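-- pv_equiv track=rewrite | github.com/MrBrantCode/unitest_baseline | mut_generate/mist_train_cf/cf_41214/solution.py | extract_latest_version
-- ===== SOURCE A (Python) =====
-- from typing import List, Tuple
--
-- def extract_latest_version(file_paths: List[str]) -> List[Tuple[str, str]]:
--     extracted_versions = []
--     for path in file_paths:
--         version_start = path.find('v')  # Find the position of 'v' in the file path
--         if version_start != -1:  # If 'v' is found
--             version_end = path.find('-', version_start)  # Find the position of '-' after 'v'
--             if version_end != -1:  # If '-' is found
--                 version = path[version_start + 1:version_end]  # Extract the version substring
--             else:
--                 version = path[version_start + 1:]  # Extract the version substring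
--             extracted_versions.append((path, version))  # Add the original path and extracted version to the result list
--     return extracted_versions
-- ===== SOURCE B (Python) =====
-- from typing import List, Tuple
--
-- def extract_latest_version(file_paths: List[str]) -> List[Tuple[str, str]]:
--     # Character-level state machine per path: 0 = before 'v', 1 = collecting
--     # version chars, 2 = stopped at '-'. No index arithmetic, no slicing.
--     result = []
--     for path in file_paths:
--         state = 0
--         buf = []
--         for ch in path:
--             if state == 0:
--                 if ch == 'v':
--                     state = 1
--             elif state == 1:
--                 if ch == '-':
--                     state = 2
--                 else:
--                     buf.append(ch)
--         if state != 0: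
--             result.append((path, ''.join(buf)))
--     return result
-- ===== Notes on version B (the rewrite author's own statement) =====
-- stated objective: alternative
-- what changed: B replaces A's find/find-from/slice index arithmetic with an explicit per-character finite state machine (before-'v' / collecting / stopped-at-'-') that builds the version string incrementally in one character pass.
import Mathlib
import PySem

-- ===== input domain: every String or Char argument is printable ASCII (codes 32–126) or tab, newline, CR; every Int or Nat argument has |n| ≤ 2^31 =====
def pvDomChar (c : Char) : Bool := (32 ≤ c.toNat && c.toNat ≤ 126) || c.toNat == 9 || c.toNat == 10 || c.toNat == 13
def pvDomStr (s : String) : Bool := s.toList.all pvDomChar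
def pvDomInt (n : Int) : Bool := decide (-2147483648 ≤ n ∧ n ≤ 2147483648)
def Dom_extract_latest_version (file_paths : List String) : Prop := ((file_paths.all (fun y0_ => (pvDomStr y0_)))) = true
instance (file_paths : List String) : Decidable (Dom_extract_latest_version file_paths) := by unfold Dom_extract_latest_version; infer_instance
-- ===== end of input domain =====

-- B replaces A's find/find-from/slice index arithmetic by a per-character finite
-- state machine (before-'v' / collecting / stopped-at-'-') that builds the version
-- incrementally; objective: alternative (same cost, different mechanism).

-- ===== PORT A =====
def extract_latest_version (file_paths : List String) : List (String × String) :=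
  file_paths.foldl (fun acc path =>
    let version_start := PySem.Str.find path "v"
    if version_start ≠ -1 then
      let version_end := PySem.Str.findFrom path "-" version_start
      let version :=
        if version_end ≠ -1 then
          PySem.Str.slice path (some (version_start + 1)) (some version_end)
        else
          PySem.Str.slice path (some (version_start + 1)) none
      acc ++ [(path, version)]
    else acc) []

-- ===== PORT B =====
-- one step of Source B's inner state machine: state 0 = before 'v', 1 = collecting, 2 = done
def pvFsmStep (sb : Nat × List Char) (ch : Char) : Nat × List Char :=
  if sb.1 = 0 then (if ch = 'v' then (1, sb.2) else sb)
  else if sb.1 = 1 then (if ch = '-' then (2, sb.2) else (1, sb.2 ++ [ch]))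
  else sb

def extract_latest_version_alt (file_paths : List String) : List (String × String) :=
  file_paths.foldl (fun result path =>
    let st := path.toList.foldl pvFsmStep (0, [])
    if st.1 ≠ 0 then result ++ [(path, String.ofList st.2)] else result) []

-- ===== PRECONDITION & SPEC =====
def Spec_extract_latest_version (file_paths : List String) (out : List (String × String)) : Prop := out = extract_latest_version_alt file_paths
instance (file_paths : List String) (out : List (String × String)) : Decidable (Spec_extract_latest_version file_paths out) := by unfold Spec_extract_latest_version; infer_instance

-- ===== CLAIM (what is proved, stated in full; the proofs are below) =====
def Claim_equal_extract_latest_version : Prop := ∀ (file_paths : List String), Dom_extract_latest_version file_paths → Spec_extract_latest_version file_paths (extract_latest_version file_paths)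

-- ===== LEMMAS AND PROOFS =====

-- proof-only characterisation of the version substring
def pvAfterV (cs : List Char) : List Char := (cs.dropWhile (· ≠ 'v')).tail
def pvBeforeDash (cs : List Char) : List Char := cs.takeWhile (· ≠ '-')

theorem pv_singleton_prefix_iff {c : Char} {l : List Char} : [c] <+: l ↔ ∃ t, l = c :: t := by
  constructor
  · rintro ⟨t, rfl⟩; exact ⟨t, rfl⟩
  · rintro ⟨t, rfl⟩; exact ⟨t, rfl⟩

theorem pv_singleton_infix_iff {c : Char} {l : List Char} : [c] <:+: l ↔ c ∈ l := by
  constructor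
  · intro h; simpa using h.sublist.subset (List.mem_singleton_self c)
  · intro h
    obtain ⟨s, t, rfl⟩ := List.append_of_mem h
    exact ⟨s, t, by simp⟩

theorem pv_dropWhile_cons {cs : List Char} {c : Char} (hmem : c ∈ cs) :
    ∃ t, cs.dropWhile (· ≠ c) = c :: t := by
  have hdecomp : cs.takeWhile (· ≠ c) ++ cs.dropWhile (· ≠ c) = cs :=
    List.takeWhile_append_dropWhile
  cases hdw : cs.dropWhile (· ≠ c) with
  | nil =>
    exfalso
    have htw : cs.takeWhile (· ≠ c) = cs := by
      rw [hdw] at hdecomp; simpa using hdecomp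
    have hc := List.mem_takeWhile_imp
      (show c ∈ cs.takeWhile (· ≠ c) by rw [htw]; exact hmem)
    simp at hc
  | cons a t =>
    have ha : ¬ ((· ≠ c) a = true) := by
      have := List.head?_dropWhile_not (p := (· ≠ c)) (l := cs)
      rw [hdw] at this; simpa using this
    simp at ha
    subst ha
    exact ⟨t, rfl⟩

-- find of a single character points at the first index where it occurs
theorem pv_find_singleton (cs : List Char) (c : Char) :
    PySem.Chars.find cs [c] =
      if c ∈ cs then ((cs.takeWhile (· ≠ c)).length : Int) else -1 := by
  split_ifs with hmem
  · have hnn : 0 ≤ PySem.Chars.find cs [c] :=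
      (PySem.Chars.find_nonneg_iff cs [c]).mpr (pv_singleton_infix_iff.mpr hmem)
    obtain ⟨hpre, hmin⟩ := PySem.Chars.find_spec hnn
    set k := (cs.takeWhile (· ≠ c)).length with hk
    have hklen : k ≤ cs.length := (cs.takeWhile_sublist _).length_le
    have hdecomp : cs.takeWhile (· ≠ c) ++ cs.dropWhile (· ≠ c) = cs :=
      List.takeWhile_append_dropWhile
    have hdropk : cs.drop k = cs.dropWhile (· ≠ c) := by
      conv_lhs => rw [← hdecomp]
      exact List.drop_left
    have hdw : ∃ t, cs.dropWhile (· ≠ c) = c :: t := pv_dropWhile_cons hmem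
    have hprek : [c] <+: cs.drop k := by
      obtain ⟨t, ht⟩ := hdw
      rw [hdropk, ht]; exact ⟨t, rfl⟩
    have hle : (PySem.Chars.find cs [c]).toNat ≤ k := by
      by_contra h
      exact absurd hprek (hmin k (by omega))
    have hge : k ≤ (PySem.Chars.find cs [c]).toNat := by
      by_contra h
      rw [not_le] at h
      obtain ⟨t, ht⟩ := pv_singleton_prefix_iff.mp hpre
      set i := (PySem.Chars.find cs [c]).toNat with hi_def
      have hi : i < cs.length := by omega
      have hget? : cs[i]? = some c := by
        rw [← List.head?_drop, ht]; rfl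
      have h1 : (cs.takeWhile (· ≠ c))[i]? = some c := by
        rw [← List.getElem?_append_left (l₂ := cs.dropWhile (· ≠ c)) (by omega),
          hdecomp]
        exact hget?
      have hc := List.mem_takeWhile_imp (List.mem_of_getElem? h1)
      simp at hc
    omega
  · rw [PySem.Chars.find_eq_neg_one_iff]
    exact fun h => hmem (pv_singleton_infix_iff.mp h)

-- the value A computes for one path equals the takeWhile/dropWhile characterisation
theorem pv_step_eq (p : String) (hv : 'v' ∈ p.toList) :
    (let version_start := PySem.Str.find p "v"
     let version_end := PySem.Str.findFrom p "-" version_start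
     if version_end ≠ -1 then
       PySem.Str.slice p (some (version_start + 1)) (some version_end)
     else
       PySem.Str.slice p (some (version_start + 1)) none)
    = String.ofList (pvBeforeDash (pvAfterV p.toList)) := by
  set cs := p.toList with hcs
  set k := (cs.takeWhile (· ≠ 'v')).length with hk
  have hfind : PySem.Str.find p "v" = (k : Int) := by
    rw [PySem.Str.find_eq]
    show PySem.Chars.find cs ['v'] = _
    rw [pv_find_singleton, if_pos hv]
  have hklen : k ≤ cs.length := (cs.takeWhile_sublist _).length_le
  have hdecomp : cs.takeWhile (· ≠ 'v') ++ cs.dropWhile (· ≠ 'v') = cs :=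
    List.takeWhile_append_dropWhile
  obtain ⟨t, hdw⟩ := pv_dropWhile_cons hv
  have hdropk : cs.drop k = 'v' :: t := by
    conv_lhs => rw [← hdecomp]
    rw [List.drop_left]
    exact hdw
  have hafter : pvAfterV cs = t := by
    unfold pvAfterV; rw [hdw]; rfl
  have hdropk1 : cs.drop (k + 1) = t := by
    have : (cs.drop k).drop 1 = cs.drop (k + 1) := List.drop_drop
    rw [← this, hdropk]; rfl
  have hfindFrom : PySem.Str.findFrom p "-" (k : Int) =
      if PySem.Chars.find (cs.drop k) ['-'] = -1 then -1
      else (k : Int) + PySem.Chars.find (cs.drop k) ['-'] := by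
    rw [PySem.Str.findFrom_eq]
    exact PySem.Chars.findFrom_natCast cs ['-'] k hklen
  simp only [hfind, hfindFrom, hdropk, hafter]
  by_cases hd : '-' ∈ t
  · -- '-' occurs after the 'v': A slices up to it, the takeWhile stops there
    set q := t.takeWhile (· ≠ '-') with hq
    have hfd : PySem.Chars.find ('v' :: t) ['-'] = ((q.length + 1 : Nat) : Int) := by
      rw [pv_find_singleton, if_pos (by simp [hd])]
      rw [List.takeWhile_cons_of_pos (by decide)]
      push_cast; simp [hq]
    rw [hfd]
    have h1 : ¬ (((q.length + 1 : Nat) : Int) = -1) := by push_cast; omega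
    rw [if_neg h1]
    have h2 : ((k : Int) + ((q.length + 1 : Nat) : Int)) ≠ -1 := by push_cast; omega
    rw [if_pos h2]
    apply String.toList_inj.mp
    rw [PySem.Str.toList_slice, String.toList_ofList]
    show PySem.List.slice cs (some ((k : Int) + 1)) (some ((k : Int) + ((q.length + 1 : Nat) : Int))) = pvBeforeDash t
    have hb1 : ((k : Int) + 1) = ((k + 1 : Nat) : Int) := by push_cast; ring
    have hb2 : ((k : Int) + ((q.length + 1 : Nat) : Int)) = ((k + 1 + q.length : Nat) : Int) := by
      push_cast; ring
    rw [hb1, hb2, PySem.List.slice_natCast, hdropk1]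
    have : k + 1 + q.length - (k + 1) = q.length := by omega
    rw [this]
    unfold pvBeforeDash
    obtain ⟨r, hr⟩ := t.takeWhile_prefix (fun x => decide (x ≠ '-'))
    conv_lhs => rw [← hr]
    exact List.take_left
  · -- no '-' after the 'v': A takes the rest, the takeWhile keeps everything
    have hfd : PySem.Chars.find ('v' :: t) ['-'] = -1 := by
      rw [pv_find_singleton, if_neg (by simp [hd])]
    rw [hfd]
    rw [if_pos rfl, if_neg (by simp)]
    apply String.toList_inj.mp
    rw [PySem.Str.toList_slice, String.toList_ofList]
    show PySem.List.slice cs (some ((k : Int) + 1)) none = pvBeforeDash t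
    have hb1 : ((k : Int) + 1) = ((k + 1 : Nat) : Int) := by push_cast; ring
    rw [hb1, PySem.List.slice_from_natCast, hdropk1]
    unfold pvBeforeDash
    refine (List.takeWhile_eq_self_iff.mpr ?_).symm
    intro x hx
    simp only [decide_eq_true_eq]
    intro hxe
    exact hd (hxe ▸ hx)

theorem pv_findne (p : String) : (PySem.Str.find p "v" ≠ -1) ↔ 'v' ∈ p.toList := by
  rw [PySem.Str.find_eq]
  show PySem.Chars.find p.toList ['v'] ≠ -1 ↔ _
  rw [PySem.Chars.find_ne_neg_one_iff, pv_singleton_infix_iff]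

-- === the FSM of B, characterised per starting state ===
theorem pv_fsm2 (cs : List Char) (buf : List Char) :
    cs.foldl pvFsmStep (2, buf) = (2, buf) := by
  induction cs with
  | nil => rfl
  | cons c cs ih => simpa [pvFsmStep] using ih

theorem pv_fsm1 (cs : List Char) (buf : List Char) :
    cs.foldl pvFsmStep (1, buf) =
      if '-' ∈ cs then (2, buf ++ cs.takeWhile (· ≠ '-')) else (1, buf ++ cs) := by
  induction cs generalizing buf with
  | nil => simp
  | cons c cs ih =>
    simp only [List.foldl_cons]
    have hstep : pvFsmStep (1, buf) c = if c = '-' then (2, buf) else (1, buf ++ [c]) := by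
      simp [pvFsmStep]
    rw [hstep]
    by_cases hc : c = '-'
    · subst hc
      rw [if_pos rfl, pv_fsm2, if_pos List.mem_cons_self,
        List.takeWhile_cons_of_neg (by decide)]
      simp
    · rw [if_neg hc, ih]
      by_cases hd : '-' ∈ cs
      · rw [if_pos hd, if_pos (List.mem_cons_of_mem _ hd),
          List.takeWhile_cons_of_pos (by simp [hc])]
        simp
      · rw [if_neg hd, if_neg (by simp [hd]; exact fun h => hc h.symm)]
        simp

theorem pv_fsm0 (cs : List Char) :
    cs.foldl pvFsmStep (0, []) =
      if 'v' ∈ cs then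
        (if '-' ∈ pvAfterV cs then 2 else 1, pvBeforeDash (pvAfterV cs))
      else (0, []) := by
  induction cs with
  | nil => simp
  | cons c cs ih =>
    simp only [List.foldl_cons]
    have hstep : pvFsmStep ((0 : Nat), ([] : List Char)) c
        = if c = 'v' then (1, []) else (0, []) := by
      simp [pvFsmStep]
    rw [hstep]
    by_cases hc : c = 'v'
    · subst hc
      rw [if_pos rfl, pv_fsm1]
      have hafter : pvAfterV ('v' :: cs) = cs := by
        unfold pvAfterV
        rw [List.dropWhile_cons_of_neg (by decide)]
        rfl
      rw [if_pos List.mem_cons_self, hafter]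
      unfold pvBeforeDash
      by_cases hd : '-' ∈ cs
      · rw [if_pos hd, if_pos hd]
        simp
      · rw [if_neg hd, if_neg hd,
          List.takeWhile_eq_self_iff.mpr (fun x hx => by simp; exact fun h => hd (h ▸ hx))]
        simp
    · rw [if_neg hc, ih]
      have hafter : pvAfterV (c :: cs) = pvAfterV cs := by
        unfold pvAfterV
        rw [List.dropWhile_cons_of_pos (by simp [hc])]
      by_cases hv : 'v' ∈ cs
      · rw [if_pos hv, if_pos (List.mem_cons_of_mem _ hv), hafter]
      · rw [if_neg hv, if_neg (by simp [hv]; exact fun h => hc h.symm)]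

-- ===== VERDICT (by name: the statement is the Claim_ definition above) =====
theorem extract_latest_version_spec : Claim_equal_extract_latest_version := by
  intro file_paths _
  unfold Spec_extract_latest_version extract_latest_version extract_latest_version_alt
  have hmid : ∀ (fp : List String) (acc : List (String × String)),
      fp.foldl (fun acc path =>
        let version_start := PySem.Str.find path "v"
        if version_start ≠ -1 then
          let version_end := PySem.Str.findFrom path "-" version_start
          let version :=
            if version_end ≠ -1 then
              PySem.Str.slice path (some (version_start + 1)) (some version_end)
            else
              PySem.Str.slice path (some (version_start + 1)) none
          acc ++ [(path, version)]
        else acc) acc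
      = fp.foldl (fun result path =>
          let st := path.toList.foldl pvFsmStep (0, [])
          if st.1 ≠ 0 then result ++ [(path, String.ofList st.2)] else result) acc := by
    intro fp
    induction fp with
    | nil => intro acc; rfl
    | cons p fp ih =>
      intro acc
      simp only [List.foldl_cons]
      rw [ih]
      congr 1
      simp only [pv_fsm0]
      by_cases hv : 'v' ∈ p.toList
      · rw [if_pos hv]
        have hA : PySem.Str.find p "v" ≠ -1 := (pv_findne p).mpr hv
        rw [if_pos hA]
        have hB : (if '-' ∈ pvAfterV p.toList then 2 else 1) ≠ 0 := by
          split_ifs <;> decide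
        rw [if_pos hB]
        exact congrArg (fun v => acc ++ [(p, v)]) (pv_step_eq p hv)
      · rw [if_neg hv]
        rw [if_neg (by simpa using (pv_findne p).not.mpr hv), if_neg (by simp)]
  exact hmid file_paths []
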